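-- pv_equiv track=rewrite | github.com/Anmol-Singh-Jaggi/interview-notes | notes/algo-ds-practice/problems/tree/verify_preorder.py | is_valid_preorder
-- ===== SOURCE A (Python) =====
-- def is_valid_preorder(preorder):
--     preorder = preorder.split(",")
--     # CAREFUL: Its 1 initially!
--     slots = 1
--     for i in range(len(preorder)):
--         val = preorder[i]
--         slots -= 1
--         # CAREFUL: This is important!
--         if slots < 0:
--             return False
--         if val != "#":
--             slots += 2
--     return slots == 0
-- ===== SOURCE B (Python) =====
-- def is_valid_preorder(preorder):
--     stack = []
--     for tok in preorder.split(","):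
--         stack.append(tok)
--         while len(stack) >= 3 and stack[-1] == "#" and stack[-2] == "#" and stack[-3] != "#":
--             del stack[-3:]
--             stack.append("#")
--     return stack == ["#"]
-- ===== Notes on version B (the rewrite author's own statement) =====
-- stated objective: alternative
-- what changed: Replaces A's slot-counting loop with early return by an explicit stack that pushes each token and repeatedly collapses a completed subtree (a value token with two completed children on top) into a single completed-subtree marker, accepting iff the final stack is exactly one completed subtree.
import Mathlib
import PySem

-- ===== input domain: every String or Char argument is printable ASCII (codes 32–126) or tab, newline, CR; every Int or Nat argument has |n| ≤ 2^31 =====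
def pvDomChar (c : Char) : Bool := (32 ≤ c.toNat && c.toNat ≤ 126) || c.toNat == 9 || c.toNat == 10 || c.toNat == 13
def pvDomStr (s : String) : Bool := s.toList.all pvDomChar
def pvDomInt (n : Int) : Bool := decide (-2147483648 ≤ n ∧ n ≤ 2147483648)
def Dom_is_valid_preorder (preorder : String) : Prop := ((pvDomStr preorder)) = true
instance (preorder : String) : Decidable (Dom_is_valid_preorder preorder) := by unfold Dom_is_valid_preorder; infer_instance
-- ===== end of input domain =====

-- B replaces A's slot-counting loop (with early False) by an explicit stack that
-- collapses completed [number, '#', '#'] subtrees; alternative structure, same cost.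

-- ===== PORT A =====
-- the for-loop over the split tokens with its early `return False`, as structural recursion
def pvLoopA : List String → Int → Bool
  | [], slots => slots == 0
  | val :: rest, slots =>
    let slots := slots - 1
    if slots < 0 then false
    else if val ≠ "#" then pvLoopA rest (slots + 2)
    else pvLoopA rest slots

def is_valid_preorder (preorder : String) : Bool :=
  pvLoopA ((PySem.Str.split? preorder ",").getD []) 1

-- ===== PORT B =====
-- stack held top-first (head = Python's stack[-1]); `pvCollapse` is Source B's inner while-loop:
-- the condition is exactly len≥3 ∧ stack[-1]="#" ∧ stack[-2]="#" ∧ stack[-3]≠"#"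
def pvCollapse : List String → List String
  | a :: b :: n :: rest =>
    if a = "#" ∧ b = "#" ∧ n ≠ "#" then pvCollapse ("#" :: rest)
    else a :: b :: n :: rest
  | s => s
  termination_by s => s.length

def is_valid_preorder_alt (preorder : String) : Bool :=
  (((PySem.Str.split? preorder ",").getD []).foldl
      (fun st tok => pvCollapse (tok :: st)) []) == ["#"]

-- ===== PRECONDITION & SPEC =====
def Spec_is_valid_preorder (preorder : String) (out : Bool) : Prop := out = is_valid_preorder_alt preorder
instance (preorder : String) (out : Bool) : Decidable (Spec_is_valid_preorder preorder out) := by unfold Spec_is_valid_preorder; infer_instance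

-- ===== CLAIM (what is proved, stated in full; the proofs are below) =====
def Claim_equal_is_valid_preorder : Prop := ∀ (preorder : String), Dom_is_valid_preorder preorder → Spec_is_valid_preorder preorder (is_valid_preorder preorder)

-- ===== LEMMAS AND PROOFS =====

-- shape of a collapsed stack (top-first) of an in-progress parse, with its open-slot count
inductive PvSh : List String → Int → Prop
  | nil : PvSh [] 1
  | lone (n : String) (h : n ≠ "#") {st : List String} {s : Int} :
      PvSh st s → PvSh (n :: st) (s + 1)
  | paired (n : String) (h : n ≠ "#") {st : List String} {s : Int} :
      PvSh st s → PvSh ("#" :: n :: st) s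

theorem pvSh_pos {st : List String} {s : Int} (h : PvSh st s) : 1 ≤ s := by
  induction h with
  | nil => omega
  | lone n h _ ih => omega
  | paired n h _ ih => exact ih

theorem pvSh_ne_hash {st : List String} {s : Int} (h : PvSh st s) : st ≠ ["#"] := by
  cases h with
  | nil => simp
  | lone n hn _ => intro he; injection he with h1 _; exact hn h1
  | paired n hn h => intro he; injection he with _ h2; simp at h2

-- equation lemmas for pvCollapse
theorem pvCollapse_cond (a b n : String) (rest : List String)
    (h : a = "#" ∧ b = "#" ∧ n ≠ "#") :
    pvCollapse (a :: b :: n :: rest) = pvCollapse ("#" :: rest) := by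
  conv_lhs => rw [pvCollapse]
  rw [if_pos h]

theorem pvCollapse_not_cond (a b n : String) (rest : List String)
    (h : ¬ (a = "#" ∧ b = "#" ∧ n ≠ "#")) :
    pvCollapse (a :: b :: n :: rest) = a :: b :: n :: rest := by
  conv_lhs => rw [pvCollapse]
  rw [if_neg h]

theorem pvCollapse_short (st : List String) (h : st.length < 3) : pvCollapse st = st := by
  match st with
  | [] => unfold pvCollapse; rfl
  | [a] => unfold pvCollapse; rfl
  | [a, b] => unfold pvCollapse; rfl
  | a :: b :: n :: rest => simp at h; omega

-- the "A has already returned False" stacks: bottom element "#", length ≥ 2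
def PvBad (st : List String) : Prop := st.getLast? = some "#" ∧ 2 ≤ st.length

theorem pvCollapse_bad_aux (N : Nat) : ∀ st : List String, st.length ≤ N →
    st.getLast? = some "#" → 2 ≤ st.length → PvBad (pvCollapse st) := by
  induction N with
  | zero => intro st hlen _ h2; omega
  | succ N ih =>
    intro st hlen h1 h2
    match st with
    | [a] => simp at h2
    | [a, b] => exact ⟨by rw [pvCollapse_short _ (by simp)]; exact h1, by rw [pvCollapse_short _ (by simp)]; simp⟩
    | a :: b :: n :: rest =>
      by_cases hc : a = "#" ∧ b = "#" ∧ n ≠ "#"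
      · rw [pvCollapse_cond a b n rest hc]
        cases rest with
        | nil =>
          simp [List.getLast?] at h1
          exact absurd h1 hc.2.2
        | cons r rs =>
          apply ih ("#" :: r :: rs)
          · simp at hlen ⊢; omega
          · simpa using h1
          · simp
      · rw [pvCollapse_not_cond a b n rest hc]
        exact ⟨h1, h2⟩

theorem pvCollapse_bad {st : List String} (h1 : st.getLast? = some "#") (h2 : 2 ≤ st.length) :
    PvBad (pvCollapse st) :=
  pvCollapse_bad_aux st.length st le_rfl h1 h2

theorem pvBad_step (st : List String) (tok : String) (h : PvBad st) :
    PvBad (pvCollapse (tok :: st)) := by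
  obtain ⟨h1, h2⟩ := h
  match st with
  | x :: xs =>
    apply pvCollapse_bad
    · simpa using h1
    · simp

theorem pvBad_fold (ts : List String) (st : List String) (h : PvBad st) :
    (ts.foldl (fun st tok => pvCollapse (tok :: st)) st == ["#"]) = false := by
  induction ts generalizing st with
  | nil =>
    obtain ⟨_, h2⟩ := h
    simp only [List.foldl_nil, beq_eq_false_iff_ne]
    intro he; subst he; simp at h2
  | cons t ts ih => exact ih _ (pvBad_step st t h)

-- pushing a non-"#" token never collapses anything
theorem pvCollapse_of_ne_hash (v : String) (hv : v ≠ "#") (st : List String) :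
    pvCollapse (v :: st) = v :: st := by
  match st with
  | [] => exact pvCollapse_short _ (by simp)
  | [a] => exact pvCollapse_short _ (by simp)
  | a :: b :: rest => exact pvCollapse_not_cond v a b rest (by tauto)

-- pushing "#" onto a shaped stack: either the parse completes (s = 1) or stays shaped
theorem pvCollapse_hash {st : List String} {s : Int} (h : PvSh st s) :
    (s = 1 ∧ pvCollapse ("#" :: st) = ["#"]) ∨ (2 ≤ s ∧ PvSh (pvCollapse ("#" :: st)) (s - 1)) := by
  induction h with
  | nil => left; exact ⟨rfl, pvCollapse_short _ (by simp)⟩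
  | @lone n hn st' s' h' ih =>
    right
    have hs' : 1 ≤ s' := pvSh_pos h'
    refine ⟨by omega, ?_⟩
    have heq : pvCollapse ("#" :: n :: st') = "#" :: n :: st' := by
      match st' with
      | [] => exact pvCollapse_short _ (by simp)
      | c :: cs => exact pvCollapse_not_cond "#" n c cs (by tauto)
    rw [heq]
    have hsh := PvSh.paired n hn h'
    have harith : s' + 1 - 1 = s' := by omega
    rw [harith]
    exact hsh
  | @paired n hn st' s' h' ih =>
    rw [pvCollapse_cond "#" "#" n st' ⟨rfl, rfl, hn⟩]
    exact ih

theorem pvMain (ts : List String) (st : List String) (s : Int) (h : PvSh st s) :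
    pvLoopA ts s = (ts.foldl (fun st tok => pvCollapse (tok :: st)) st == ["#"]) := by
  induction ts generalizing st s with
  | nil =>
    have hs := pvSh_pos h
    have hne := pvSh_ne_hash h
    simp only [pvLoopA, List.foldl_nil]
    rw [show (s == 0) = false by simp; omega]
    rw [show (st == ["#"]) = false from beq_eq_false_iff_ne.mpr hne]
  | cons v ts ih =>
    have hs := pvSh_pos h
    simp only [pvLoopA, List.foldl_cons]
    rw [if_neg (show ¬ (s - 1 < 0) by omega)]
    by_cases hv : v = "#"
    · subst hv
      rw [if_neg (show ¬ ("#" : String) ≠ "#" by simp)]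
      rcases pvCollapse_hash h with ⟨h1, heq⟩ | ⟨h2, hsh⟩
      · subst h1
        rw [heq]
        cases ts with
        | nil => norm_num [pvLoopA]
        | cons w ws =>
          simp only [pvLoopA, List.foldl_cons]
          rw [if_pos (show (1 : Int) - 1 - 1 < 0 by norm_num)]
          have hbad : PvBad (pvCollapse (w :: ["#"])) :=
            pvCollapse_bad (by simp) (by simp)
          exact (pvBad_fold ws _ hbad).symm
      · exact ih _ _ hsh
    · rw [if_pos (show v ≠ "#" from hv)]
      rw [pvCollapse_of_ne_hash v hv st]
      rw [show s - 1 + 2 = s + 1 by omega]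
      exact ih _ _ (PvSh.lone v hv h)

-- ===== VERDICT (by name: the statement is the Claim_ definition above) =====
theorem is_valid_preorder_spec : Claim_equal_is_valid_preorder := by
  intro preorder _
  unfold Spec_is_valid_preorder is_valid_preorder is_valid_preorder_alt
  exact pvMain _ [] 1 PvSh.nil
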